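-- pv_equiv track=rewrite | github.com/Jason-xzq/LC-fighting | WonderOA/StringReduction.py | redections
-- ===== SOURCE A (Python) =====
-- def redections(string):
--     d = [0, 0, 0]
--
--     for letter in string:
--         if letter  == 'a':
--             d[0] += 1
--         elif letter == 'b':
--             d[1] += 1
--         else:
--             d[2] += 1
--
--     while True:
--         count = 0
--
--         for i in d:
--             if i == 0:
--                 count += 1
--         if count == 2:
--             break
--
--         d.sort(reverse=True)
--         d[0] -= 1
--         d[1] -= 1
--         d[2] += 1
--
--     sum = 0
--     for i in d:
--         sum += i
--     return sum
-- ===== SOURCE B (Python) =====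
-- def redections(string):
--     # Closed form: count 'a', 'b', rest; if at most one class is present the
--     # string is already irreducible; otherwise the answer is 2 when all three
--     # counts share a parity, else 1.
--     a = string.count('a')
--     b = string.count('b')
--     c = len(string) - a - b
--     nonzero = [x for x in (a, b, c) if x]
--     if len(nonzero) <= 1:
--         return sum(nonzero)
--     if a % 2 == b % 2 == c % 2:
--         return 2
--     return 1
-- ===== Notes on version B (the rewrite author's own statement) =====
-- stated objective: faster
-- what changed: Replaces A's step-by-step reduction simulation (a while-loop that sorts and decrements counters once per reduction step) with an O(1) closed form over the three character counts: at most one class present -> its count, all counts same parity -> 2, else 1.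
-- intended difference: On the empty string A's reduction loop underflows its counters and returns -2; B returns 0, the length of the already-empty string, which is the intended value. — e.g. on redections(""): A returns -2, B returns 0
import Mathlib
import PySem

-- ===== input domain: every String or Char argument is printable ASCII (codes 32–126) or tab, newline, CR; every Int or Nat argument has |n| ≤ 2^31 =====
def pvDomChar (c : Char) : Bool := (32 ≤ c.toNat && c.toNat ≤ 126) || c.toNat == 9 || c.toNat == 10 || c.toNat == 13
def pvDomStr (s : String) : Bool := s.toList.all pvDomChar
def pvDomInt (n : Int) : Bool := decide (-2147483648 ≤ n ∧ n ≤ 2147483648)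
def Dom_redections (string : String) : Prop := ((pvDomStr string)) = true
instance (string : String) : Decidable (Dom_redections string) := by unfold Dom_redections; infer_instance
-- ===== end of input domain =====

-- B replaces A's step-by-step reduction simulation with an O(1) closed form over the
-- three character counts; on the empty string A's loop underflows and returns -2 while
-- B returns 0 (stated as the intended difference D_).


-- ===== PORT A =====
-- counting loop body: "if letter == 'a': d[0] += 1 elif letter == 'b': d[1] += 1 else: d[2] += 1"
-- (the 3-cell list d is carried as a triple)
def pvStepA (d : Int × Int × Int) (letter : Char) : Int × Int × Int :=
  if letter == 'a' then (d.1 + 1, d.2.1, d.2.2)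
  else if letter == 'b' then (d.1, d.2.1 + 1, d.2.2)
  else (d.1, d.2.1, d.2.2 + 1)

-- "count = 0; for i in d: if i == 0: count += 1" — the for-loop unrolled over the three cells
def pvZeroCount (x y z : Int) : Int :=
  (if x = 0 then (0 : Int) + 1 else 0) + (if y = 0 then 1 else 0) + (if z = 0 then 1 else 0)

-- "d.sort(reverse=True)" on the 3-cell list, written out (descending order)
def pvSort3 (x y z : Int) : Int × Int × Int :=
  if y ≤ x then
    if z ≤ y then (x, y, z)
    else if z ≤ x then (x, z, y)
    else (z, x, y)
  else
    if z ≤ x then (y, x, z)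
    else if z ≤ y then (y, z, x)
    else (z, y, x)

-- the "while True" loop; the fuel argument is a totality guard only (proved sufficient below)
def pvLoopA : Nat → Int × Int × Int → Int × Int × Int
  | 0, d => d
  | fuel + 1, (x, y, z) =>
    if pvZeroCount x y z = 2 then (x, y, z)
    else
      let s := pvSort3 x y z
      pvLoopA fuel (s.1 - 1, s.2.1 - 1, s.2.2 + 1)

def redections (string : String) : Int :=
  let d := string.toList.foldl pvStepA (0, 0, 0)
  let r := pvLoopA ((d.1 + d.2.1 + d.2.2).toNat + 3) d
  r.1 + r.2.1 + r.2.2   -- "sum = 0; for i in d: sum += i"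

-- ===== PORT B =====
def pvAltCore (a b c : Int) : Int :=
  let nonzero := [a, b, c].filter (fun x => x != 0)
  if nonzero.length ≤ 1 then nonzero.sum
  else if PySem.Int.mod a 2 = PySem.Int.mod b 2 ∧ PySem.Int.mod b 2 = PySem.Int.mod c 2 then 2
  else 1

def redections_alt (string : String) : Int :=
  let a : Int := (PySem.Str.count string "a" : Int)
  let b : Int := (PySem.Str.count string "b" : Int)
  let c : Int := PySem.Str.len string - a - b
  pvAltCore a b c

-- ===== PRECONDITION & SPEC =====
-- On the empty string A's reduction loop underflows its counters and returns -2;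
-- B returns 0, the length of the already-empty string, which is the intended value.
def D_redections (string : String) : Prop := string = ""
instance (string : String) : Decidable (D_redections string) := by unfold D_redections; infer_instance

def Spec_redections (string : String) (out : Int) : Prop := ¬ D_redections string → out = redections_alt string
instance (string : String) (out : Int) : Decidable (Spec_redections string out) := by unfold Spec_redections; infer_instance

def pvDiffWitness_redections : String := ""
def pvDiffWitnessOut_redections : Int × Int := (-2, 0)

-- ===== CLAIM (what is proved, stated in full; the proofs are below) =====
def Claim_unchanged_redections : Prop := ∀ (string : String), Dom_redections string → Spec_redections string (redections string)
def Claim_changed_redections : Prop := Dom_redections (pvDiffWitness_redections) ∧ D_redections (pvDiffWitness_redections) ∧ redections (pvDiffWitness_redections) = pvDiffWitnessOut_redections.1 ∧ redections_alt (pvDiffWitness_redections) = pvDiffWitnessOut_redections.2 ∧ pvDiffWitnessOut_redections.1 ≠ pvDiffWitnessOut_redections.2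
def Claim_exact_redections : Prop := ∀ (string : String), Dom_redections string → D_redections string → redections string ≠ redections_alt string

-- ===== LEMMAS AND PROOFS =====

-- the closed form both ports are reduced to
def pvCF (x y z : Int) : Int :=
  if pvZeroCount x y z = 2 then x + y + z
  else if x % 2 = y % 2 ∧ y % 2 = z % 2 then 2 else 1

theorem pvZC_swap12 (a b c : Int) : pvZeroCount b a c = pvZeroCount a b c := by
  unfold pvZeroCount; split_ifs <;> omega

theorem pvZC_swap23 (a b c : Int) : pvZeroCount a c b = pvZeroCount a b c := by
  unfold pvZeroCount; split_ifs <;> omega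

theorem pvCF_swap12 (a b c : Int) : pvCF b a c = pvCF a b c := by
  unfold pvCF; rw [pvZC_swap12]; split_ifs <;> omega

theorem pvCF_swap23 (a b c : Int) : pvCF a c b = pvCF a b c := by
  unfold pvCF; rw [pvZC_swap23]; split_ifs <;> omega

set_option maxHeartbeats 1000000 in
theorem pvCF_sorted_step (x y z : Int) (hxy : y ≤ x) (hyz : z ≤ y) (hz : 0 ≤ z)
    (hnz : ¬ pvZeroCount x y z = 2) (hs : 1 ≤ x + y + z) :
    pvCF (x - 1) (y - 1) (z + 1) = pvCF x y z ∧ 1 ≤ y ∧ 2 ≤ x + y + z := by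
  unfold pvCF pvZeroCount at *
  split_ifs at * <;> omega

theorem pvFoldCounts : ∀ (cs : List Char) (x y z : Int),
    cs.foldl pvStepA (x, y, z) =
      (x + cs.count 'a', y + cs.count 'b',
       z + ((cs.length : Int) - cs.count 'a' - cs.count 'b')) := by
  intro cs
  induction cs with
  | nil => intro x y z; simp
  | cons h t ih =>
    intro x y z
    simp only [List.foldl_cons, pvStepA]
    by_cases ha : h = 'a'
    · subst ha; simp [ih]; omega
    · by_cases hb : h = 'b'
      · subst hb; simp [ih, ha]; omega
      · simp [ih, ha, hb]; omega

theorem pvLoopCF : ∀ (fuel : Nat) (x y z : Int), 0 ≤ x → 0 ≤ y → 0 ≤ z →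
    1 ≤ x + y + z → (x + y + z).toNat ≤ fuel →
    (pvLoopA fuel (x, y, z)).1 + (pvLoopA fuel (x, y, z)).2.1 + (pvLoopA fuel (x, y, z)).2.2
      = pvCF x y z := by
  intro fuel
  induction fuel with
  | zero => intro x y z hx hy hz hs hf; exfalso; omega
  | succ n ih =>
    intro x y z hx hy hz hs hf
    by_cases h2 : pvZeroCount x y z = 2
    · simp [pvLoopA, h2, pvCF]
    · simp only [pvLoopA, if_neg h2]
      unfold pvSort3
      split_ifs with h1 hb hc hd he <;> dsimp only
      · obtain ⟨hcf, hq, hsum⟩ := pvCF_sorted_step x y z h1 hb hz h2 hs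
        rw [ih _ _ _ (by omega) (by omega) (by omega) (by omega) (by omega), hcf]
      · have hnz' : ¬ pvZeroCount x z y = 2 := by rw [pvZC_swap23]; exact h2
        obtain ⟨hcf, hq, hsum⟩ := pvCF_sorted_step x z y hc (by omega) hy hnz' (by omega)
        rw [ih _ _ _ (by omega) (by omega) (by omega) (by omega) (by omega), hcf,
            pvCF_swap23]
      · have hnz' : ¬ pvZeroCount z x y = 2 := by rw [pvZC_swap12, pvZC_swap23]; exact h2
        obtain ⟨hcf, hq, hsum⟩ := pvCF_sorted_step z x y (by omega) h1 hy hnz' (by omega)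
        rw [ih _ _ _ (by omega) (by omega) (by omega) (by omega) (by omega), hcf,
            pvCF_swap12, pvCF_swap23]
      · have hnz' : ¬ pvZeroCount y x z = 2 := by rw [pvZC_swap12]; exact h2
        obtain ⟨hcf, hq, hsum⟩ := pvCF_sorted_step y x z (by omega) hd hz hnz' (by omega)
        rw [ih _ _ _ (by omega) (by omega) (by omega) (by omega) (by omega), hcf,
            pvCF_swap12]
      · have hnz' : ¬ pvZeroCount y z x = 2 := by rw [pvZC_swap23, pvZC_swap12]; exact h2
        obtain ⟨hcf, hq, hsum⟩ := pvCF_sorted_step y z x he (by omega) hx hnz' (by omega)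
        rw [ih _ _ _ (by omega) (by omega) (by omega) (by omega) (by omega), hcf,
            pvCF_swap23, pvCF_swap12]
      · have hnz' : ¬ pvZeroCount z y x = 2 := by
          rw [pvZC_swap12, pvZC_swap23, pvZC_swap12]; exact h2
        obtain ⟨hcf, hq, hsum⟩ := pvCF_sorted_step z y x (by omega) (by omega) hx hnz' (by omega)
        rw [ih _ _ _ (by omega) (by omega) (by omega) (by omega) (by omega), hcf,
            pvCF_swap12, pvCF_swap23, pvCF_swap12]

theorem pvCountGoSingle (c : Char) : ∀ (fuel : Nat) (cs : List Char) (acc : Nat),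
    cs.length ≤ fuel → PySem.Chars.count.go [c] fuel cs acc = acc + cs.count c := by
  intro fuel
  induction fuel with
  | zero =>
    intro cs acc h
    cases cs with
    | nil => simp [PySem.Chars.count.go]
    | cons x t => simp at h
  | succ n ih =>
    intro cs acc h
    cases cs with
    | nil => simp [PySem.Chars.count.go]
    | cons x t =>
      simp only [PySem.Chars.count.go]
      by_cases hx : x = c
      · subst hx
        have hp : List.isPrefixOf [x] (x :: t) = true := by simp [List.isPrefixOf]
        simp [hp, ih t (acc + 1) (by simpa using h)]
        omega
      · have hp : List.isPrefixOf [c] (x :: t) = false := by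
          simp [List.isPrefixOf]; exact fun hh => (hx hh.symm).elim
        simp [hp, ih t acc (by simpa using h), hx]

theorem pvCharsCountSingle (c : Char) (cs : List Char) :
    PySem.Chars.count cs [c] = cs.count c := by
  simp [PySem.Chars.count, pvCountGoSingle c cs.length cs 0 le_rfl]

theorem pvCountAB (cs : List Char) : cs.count 'a' + cs.count 'b' ≤ cs.length := by
  induction cs with
  | nil => simp
  | cons h t ih =>
    simp only [List.count_cons, List.length_cons]
    by_cases ha : h = 'a' <;> by_cases hb : h = 'b' <;> simp_all <;> omega

theorem pvAltCoreCF (a b c : Int) (hs : 1 ≤ a + b + c) : pvAltCore a b c = pvCF a b c := by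
  by_cases h1 : a = 0 <;> by_cases h2 : b = 0 <;> by_cases h3 : c = 0 <;>
    simp [pvAltCore, pvCF, pvZeroCount, h1, h2, h3, bne_iff_ne] <;> omega

-- ===== VERDICT (by name: the statement is the Claim_ definition above) =====
theorem redections_spec : Claim_unchanged_redections := by
  intro s _ hnd
  have hne : s ≠ "" := fun h => hnd h
  have hlt : s.toList ≠ [] := fun h => hne (String.toList_eq_nil_iff.mp h)
  have hlen : 1 ≤ s.toList.length := by
    cases h : s.toList with
    | nil => exact absurd h hlt
    | cons x t => simp
  have hab := pvCountAB s.toList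
  show redections s = redections_alt s
  unfold redections redections_alt
  rw [pvFoldCounts]
  simp only [zero_add]
  rw [pvLoopCF _ _ _ _ (by positivity) (by positivity) (by omega)
      (by omega) (by omega)]
  have hstra : PySem.Str.count s "a" = s.toList.count 'a' := by
    rw [PySem.Str.count_eq]
    have h : ("a" : String).toList = ['a'] := by decide
    rw [h, pvCharsCountSingle]
  have hstrb : PySem.Str.count s "b" = s.toList.count 'b' := by
    rw [PySem.Str.count_eq]
    have h : ("b" : String).toList = ['b'] := by decide
    rw [h, pvCharsCountSingle]
  rw [hstra, hstrb, PySem.Str.len_eq]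
  rw [pvAltCoreCF _ _ _ (by omega)]

theorem redections_changed : Claim_changed_redections := by
  unfold Claim_changed_redections; decide

theorem redections_tight : Claim_exact_redections := by
  intro s _ hd
  have h : s = "" := hd
  subst h
  decide
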